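-- pv_equiv track=rewrite | github.com/youngdashu/deepFRI2-toolbox-dev | toolbox/models/utils/cif2pdb.py | split_by_chain
-- ===== SOURCE A (Python) =====
-- from typing import Dict, Literal, Tuple, List, Optional
--
-- def split_by_chain(pdb_lines) -> Dict[str, str]:
--     chain_dict = {}
--
--     for chain_id, pdb_line in pdb_lines:
--         if chain_id not in chain_dict:
--             chain_dict[chain_id] = []
--         chain_dict[chain_id].append(pdb_line)
--
--     for k in chain_dict:
--         chain_dict[k] = "\n".join(chain_dict[k])
--
--     return chain_dict
-- ===== SOURCE B (Python) =====
-- def split_by_chain(pdb_lines):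
--     # Single pass: maintain each chain's joined string directly (no list + second join loop).
--     chain_dict = {}
--     for chain_id, pdb_line in pdb_lines:
--         if chain_id in chain_dict:
--             chain_dict[chain_id] += "\n" + pdb_line
--         else:
--             chain_dict[chain_id] = pdb_line
--     return chain_dict
-- ===== Notes on version B (the rewrite author's own statement) =====
-- stated objective: simpler
-- what changed: B builds the joined string per chain incrementally in one pass (dict of strings), replacing A's two-phase dict-of-lists + separate join loop.
import Mathlib
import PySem

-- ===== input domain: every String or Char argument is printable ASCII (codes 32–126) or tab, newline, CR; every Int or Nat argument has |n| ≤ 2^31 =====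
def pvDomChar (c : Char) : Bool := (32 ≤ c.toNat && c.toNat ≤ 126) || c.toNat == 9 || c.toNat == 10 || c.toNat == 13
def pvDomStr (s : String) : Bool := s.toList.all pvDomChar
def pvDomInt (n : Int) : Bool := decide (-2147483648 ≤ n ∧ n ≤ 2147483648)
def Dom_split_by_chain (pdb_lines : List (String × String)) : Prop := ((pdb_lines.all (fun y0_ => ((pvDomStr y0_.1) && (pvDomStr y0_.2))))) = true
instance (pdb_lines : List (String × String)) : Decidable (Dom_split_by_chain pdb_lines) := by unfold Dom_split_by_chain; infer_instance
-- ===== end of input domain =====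

-- B replaces A's two-phase grouping (dict of lists, then a join loop) by a single pass that
-- maintains each chain's joined string directly; objective: simpler.

-- ===== PORT A =====
def split_by_chain (pdb_lines : List (String × String)) : List (String × String) :=
  -- chain_dict = {}; for chain_id, pdb_line in pdb_lines: if chain_id not in chain_dict:
  --   chain_dict[chain_id] = []; chain_dict[chain_id].append(pdb_line)
  let chain_dict : PySem.Dict String (List String) :=
    pdb_lines.foldl (fun d p =>
      let d := if d.contains p.1 then d else d.insert p.1 []
      d.modify p.1 [] (fun l => l ++ [p.2])) PySem.Dict.empty
  -- for k in chain_dict: chain_dict[k] = "\n".join(chain_dict[k])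
  -- (rewrites every value in place, key order unchanged: a map over the items)
  chain_dict.items.map (fun kv => (kv.1, PySem.Str.join "\n" kv.2))

-- ===== PORT B =====
def split_by_chain_alt (pdb_lines : List (String × String)) : List (String × String) :=
  -- chain_dict = {}; for chain_id, pdb_line in pdb_lines:
  --   if chain_id in chain_dict: chain_dict[chain_id] += "\n" + pdb_line
  --   else: chain_dict[chain_id] = pdb_line
  (pdb_lines.foldl (fun d p =>
      if d.contains p.1 then d.modify p.1 "" (fun s => s ++ "\n" ++ p.2)
      else d.insert p.1 p.2) (PySem.Dict.empty : PySem.Dict String String)).items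

-- ===== PRECONDITION & SPEC =====
def Spec_split_by_chain (pdb_lines : List (String × String)) (out : List (String × String)) : Prop := out = split_by_chain_alt pdb_lines
instance (pdb_lines : List (String × String)) (out : List (String × String)) : Decidable (Spec_split_by_chain pdb_lines out) := by unfold Spec_split_by_chain; infer_instance

-- ===== CLAIM (what is proved, stated in full; the proofs are below) =====
def Claim_equal_split_by_chain : Prop := ∀ (pdb_lines : List (String × String)), Dom_split_by_chain pdb_lines → Spec_split_by_chain pdb_lines (split_by_chain pdb_lines)

-- ===== LEMMAS AND PROOFS =====

-- the value map relating A's dict of line lists to B's dict of joined strings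
def pvJoinKV (kv : String × List String) : String × String := (kv.1, PySem.Str.join "\n" kv.2)

theorem pv_chars_join_append (l : List (List Char)) (v : List Char) (h : l ≠ []) :
    PySem.Chars.join ['\n'] (l ++ [v]) = PySem.Chars.join ['\n'] l ++ ['\n'] ++ v := by
  induction l with
  | nil => simp at h
  | cons x xs ih =>
    cases xs with
    | nil => simp [PySem.Chars.join_cons_cons, PySem.Chars.join_singleton]
    | cons y ys =>
      simp only [List.cons_append] at ih ⊢
      rw [PySem.Chars.join_cons_cons, PySem.Chars.join_cons_cons, ih (by simp)]
      simp

theorem pv_join_singleton (v : String) : PySem.Str.join "\n" [v] = v := by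
  simp only [PySem.Str.join, List.map_cons, List.map_nil, PySem.Chars.join_singleton]
  simp

theorem pv_join_nil : PySem.Str.join "\n" ([] : List String) = "" := by
  simp only [PySem.Str.join, List.map_nil, PySem.Chars.join_nil]

theorem pv_join_append (l : List String) (v : String) (h : l ≠ []) :
    PySem.Str.join "\n" (l ++ [v]) = PySem.Str.join "\n" l ++ "\n" ++ v := by
  simp only [PySem.Str.join, List.map_append, List.map_cons, List.map_nil]
  rw [show ("\n" : String).toList = ['\n'] from rfl,
    pv_chars_join_append (l.map String.toList) v.toList (by simpa using h)]
  have h2 : String.ofList ('\n' :: v.toList) = "\n" ++ v := by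
    rw [show ('\n' :: v.toList : List Char) = ['\n'] ++ v.toList from rfl,
      String.ofList_append, String.ofList_toList,
      show String.ofList ['\n'] = "\n" from by decide]
  simp [h2, String.append_assoc]

theorem pv_contains_congr (dA : PySem.Dict String (List String)) (dB : PySem.Dict String String)
    (h : dB.items = dA.items.map pvJoinKV) (k : String) :
    dB.contains k = dA.contains k := by
  simp only [PySem.Dict.contains, h, List.any_map]
  have heq : ((fun p : String × String => p.1 == k) ∘ pvJoinKV)
      = (fun p : String × List String => p.1 == k) := by
    funext p; simp [pvJoinKV]
  rw [heq]

theorem pv_get?_congr (dA : PySem.Dict String (List String)) (dB : PySem.Dict String String)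
    (h : dB.items = dA.items.map pvJoinKV) (k : String) :
    dB.get? k = (dA.get? k).map (PySem.Str.join "\n") := by
  simp only [PySem.Dict.get?, h, List.find?_map]
  have : ((fun p : String × String => p.1 == k) ∘ pvJoinKV)
      = (fun p : String × List String => p.1 == k) := by
    funext p; simp [pvJoinKV]
  rw [this]
  cases List.find? (fun p : String × List String => p.1 == k) dA.items <;> simp [pvJoinKV]

theorem pv_getD_congr (dA : PySem.Dict String (List String)) (dB : PySem.Dict String String)
    (h : dB.items = dA.items.map pvJoinKV) (k : String) :
    dB.getD k "" = PySem.Str.join "\n" (dA.getD k []) := by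
  simp only [PySem.Dict.getD, pv_get?_congr dA dB h k]
  cases dA.get? k <;> simp [pv_join_nil]

theorem pv_fold (l : List (String × String))
    (dA : PySem.Dict String (List String)) (dB : PySem.Dict String String)
    (hitems : dB.items = dA.items.map pvJoinKV)
    (hne : ∀ kv ∈ dA.items, kv.2 ≠ ([] : List String)) :
    (l.foldl (fun d p =>
        if d.contains p.1 then d.modify p.1 "" (fun s => s ++ "\n" ++ p.2)
        else d.insert p.1 p.2) dB).items
      = (l.foldl (fun d p =>
          let d := if d.contains p.1 then d else d.insert p.1 []
          d.modify p.1 [] (fun l => l ++ [p.2])) dA).items.map pvJoinKV := by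
  induction l generalizing dA dB with
  | nil => simpa using hitems
  | cons p rest ih =>
    obtain ⟨k, v⟩ := p
    simp only [List.foldl_cons]
    cases hc : dA.contains k with
    | true =>
      -- key already present: both sides overwrite the existing value in place
      rw [pv_contains_congr dA dB hitems k]
      simp only [hc, if_pos]
      -- A's step: the `if` keeps dA, then modify = insert of the appended list
      have hLne : dA.getD k [] ≠ [] := by
        simp only [PySem.Dict.getD]
        rcases hfind : dA.get? k with _ | w
        · exfalso
          have := PySem.Dict.get?_eq_none_iff_contains (d := dA) (k := k)
          rw [hc] at this; simp [hfind] at this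
        · simp only [Option.getD_some]
          have hmem : (k, w) ∈ dA.items := PySem.Dict.mem_items_of_get?_eq_some dA hfind
          exact hne (k, w) hmem
      apply ih
      · -- items relation after the overwriting step
        simp only [PySem.Dict.modify, PySem.Dict.insert,
          pv_contains_congr dA dB hitems k, hc, if_pos]
        simp only [hitems, List.map_map]
        apply List.map_congr_left
        intro p _
        by_cases hk : p.1 = k <;>
          simp [pvJoinKV, Function.comp, hk,
            pv_getD_congr dA dB hitems k, pv_join_append _ v hLne]
      · -- values stay nonempty
        intro kv hkv
        simp only [PySem.Dict.modify, PySem.Dict.insert, hc, if_pos] at hkv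
        simp only [List.mem_map] at hkv
        obtain ⟨q, hq, hqe⟩ := hkv
        by_cases hk : q.1 = k
        · simp [hk] at hqe; simp [← hqe]
        · simp [hk] at hqe; exact hqe ▸ hne q hq
    | false =>
      -- fresh key: both sides append a new entry
      rw [pv_contains_congr dA dB hitems k]
      simp only [hc, Bool.false_eq_true, if_false]
      have hA : ((dA.insert k []).modify k [] (fun l => l ++ [v])) = dA.insert k [v] := by
        simp only [PySem.Dict.modify, PySem.Dict.getD_insert_self, List.nil_append]
        exact PySem.Dict.insert_insert_self dA k [] [v]
      rw [hA]
      apply ih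
      · rw [PySem.Dict.items_insert_of_not_contains _ _ hc,
          PySem.Dict.items_insert_of_not_contains _ _
            (by rw [pv_contains_congr dA dB hitems k]; exact hc)]
        simp [hitems, pvJoinKV, pv_join_singleton]
      · intro kv hkv
        rw [PySem.Dict.items_insert_of_not_contains _ _ hc] at hkv
        rcases List.mem_append.mp hkv with h1 | h1
        · exact hne kv h1
        · simp at h1; simp [h1]

-- ===== VERDICT (by name: the statement is the Claim_ definition above) =====
theorem split_by_chain_spec : Claim_equal_split_by_chain := by
  intro pdb_lines _
  unfold Spec_split_by_chain split_by_chain split_by_chain_alt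
  exact (pv_fold pdb_lines PySem.Dict.empty PySem.Dict.empty rfl (by simp [PySem.Dict.empty])).symm
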